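-- pv_equiv track=rewrite | github.com/vincent-kk/Basic-Algorithm | 05. Stack/3986.py | solution
-- ===== SOURCE A (Python) =====
-- from typing import List, Tuple
--
-- def solution(N: int, strings: List[Tuple[str]]):
--     goodword = 0
--     for string in strings:
--         stack = []
--         for ch in string:
--             if len(stack) == 0:
--                 stack.append(ch)
--             else:
--                 if stack[-1] == ch:
--                     stack.pop()
--                 else:
--                     stack.append(ch)
--         if len(stack) == 0:
--             goodword += 1
--     return goodword
-- ===== SOURCE B (Python) =====
-- from typing import List, Tuple
--
-- def solution(N: int, strings: List[Tuple[str]]):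
--     goodword = 0
--     for string in strings:
--         lst = list(string)
--         changed = True
--         while changed:
--             changed = False
--             for i in range(len(lst) - 1):
--                 if lst[i] == lst[i + 1]:
--                     del lst[i:i + 2]
--                     changed = True
--                     break
--         if not lst:
--             goodword += 1
--     return goodword
-- ===== Notes on version B (the rewrite author's own statement) =====
-- stated objective: alternative
-- what changed: Replaces the single-pass stack reduction with a fixpoint that repeatedly deletes the first adjacent equal pair until none remains, then tests emptiness.
import Mathlib
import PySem

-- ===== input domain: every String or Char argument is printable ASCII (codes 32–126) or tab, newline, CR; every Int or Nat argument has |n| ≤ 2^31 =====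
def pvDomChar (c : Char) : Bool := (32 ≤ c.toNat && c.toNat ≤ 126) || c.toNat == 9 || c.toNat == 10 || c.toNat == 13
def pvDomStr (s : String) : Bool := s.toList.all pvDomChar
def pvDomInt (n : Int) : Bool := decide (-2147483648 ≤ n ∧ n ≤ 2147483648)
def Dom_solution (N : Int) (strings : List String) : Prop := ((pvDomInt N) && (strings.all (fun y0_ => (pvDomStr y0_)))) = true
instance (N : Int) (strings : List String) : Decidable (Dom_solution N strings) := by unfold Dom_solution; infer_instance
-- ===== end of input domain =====

-- B replaces A's single-pass stack cancellation by a repeated first-adjacent-pair deletion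
-- fixpoint (alternative algorithm, same cost class on these inputs); return values proved equal.


-- ===== PORT A =====
-- the inner per-character stack step (head of the list = top of the Python stack)
def stackStep (st : List Char) (ch : Char) : List Char :=
  if st.length = 0 then [ch]
  else if st.head? = some ch then st.tail
  else ch :: st

def solution (N : Int) (strings : List String) : Int :=
  strings.foldl (fun goodword string =>
    let stack := string.toList.foldl stackStep []
    if stack.length = 0 then goodword + 1 else goodword) 0

-- ===== PORT B =====
-- the inner for-loop of B: find the first adjacent equal pair, return the list with it deleted
def findPair : List Char → Option (List Char)
  | a :: b :: t => if a = b then some t else (findPair (b :: t)).map (a :: ·)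
  | _ => none

theorem findPair_length : ∀ {l l' : List Char}, findPair l = some l' → l'.length < l.length := by
  intro l
  induction l with
  | nil => intro l' h; simp [findPair] at h
  | cons a t ih =>
    intro l' h
    cases t with
    | nil => simp [findPair] at h
    | cons b t' =>
      by_cases hab : a = b
      · simp [findPair, hab] at h; subst h; simp
      · simp [findPair, hab] at h
        obtain ⟨w, hw, rfl⟩ := h
        have := ih hw
        simp only [List.length_cons] at this ⊢
        omega

-- the while-loop of B: keep deleting until no adjacent equal pair remains
def reduceFix (l : List Char) : List Char :=
  match h : findPair l with
  | some l' => reduceFix l'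
  | none => l
termination_by l.length
decreasing_by exact findPair_length h

def solution_alt (N : Int) (strings : List String) : Int :=
  strings.foldl (fun goodword string =>
    if (reduceFix string.toList).isEmpty then goodword + 1 else goodword) 0

-- ===== PRECONDITION & SPEC =====
def Spec_solution (N : Int) (strings : List String) (out : Int) : Prop := out = solution_alt N strings
instance (N : Int) (strings : List String) (out : Int) : Decidable (Spec_solution N strings out) := by unfold Spec_solution; infer_instance

-- ===== CLAIM (what is proved, stated in full; the proofs are below) =====
def Claim_equal_solution : Prop := ∀ (N : Int) (strings : List String), Dom_solution N strings → Spec_solution N strings (solution N strings)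

-- ===== LEMMAS AND PROOFS =====

-- a list (as a stack) with no two equal adjacent elements
def Irred : List Char → Prop
  | a :: b :: t => a ≠ b ∧ Irred (b :: t)
  | _ => True

theorem irred_tail : ∀ {l : List Char}, Irred l → Irred l.tail := by
  intro l h
  match l with
  | [] => trivial
  | [a] => trivial
  | a :: b :: t => exact h.2

-- the stack never holds two equal adjacent characters
theorem stackStep_irred {st : List Char} (h : Irred st) (a : Char) :
    Irred (stackStep st a) := by
  cases st with
  | nil => simp [stackStep]; trivial
  | cons x r =>
    by_cases hx : x = a
    · subst hx
      simpa [stackStep] using irred_tail h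
    · simp only [stackStep, List.length_cons, List.head?_cons]
      simp only [hx, Option.some.injEq, reduceIte, Nat.succ_ne_zero]
      exact ⟨fun he => hx he.symm, h⟩

-- processing the same character twice on a duplicate-free stack is the identity
theorem stackStep_twice {st : List Char} (h : Irred st) (a : Char) :
    stackStep (stackStep st a) a = st := by
  cases st with
  | nil => simp [stackStep]
  | cons x r =>
    by_cases hx : x = a
    · subst hx
      cases r with
      | nil => simp [stackStep]
      | cons y r' =>
        have hxy : x ≠ y := h.1
        simp [stackStep, Ne.symm hxy]
    · simp [stackStep, hx]

-- deleting the first adjacent equal pair does not change the resulting stack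
theorem foldl_findPair : ∀ (l : List Char) (l' : List Char), findPair l = some l' →
    ∀ st : List Char, Irred st → l.foldl stackStep st = l'.foldl stackStep st := by
  intro l
  induction l with
  | nil => intro l' hf; simp [findPair] at hf
  | cons a t ih =>
    intro l' hf st hst
    cases t with
    | nil => simp [findPair] at hf
    | cons b t' =>
      by_cases hab : a = b
      · simp [findPair, hab] at hf
        subst hab hf
        simp [List.foldl, stackStep_twice hst]
      · simp [findPair, hab] at hf
        obtain ⟨w, hw, rfl⟩ := hf
        simpa [List.foldl] using ih w hw (stackStep st a) (stackStep_irred hst a)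

theorem foldl_reduceFix (l : List Char) :
    ∀ st : List Char, Irred st → l.foldl stackStep st = (reduceFix l).foldl stackStep st := by
  rw [reduceFix]
  split
  · rename_i l' h
    intro st hst
    rw [foldl_findPair l l' h st hst]
    exact foldl_reduceFix l' st hst
  · intro _ _; rfl
termination_by l.length
decreasing_by exact findPair_length (by assumption)

-- a list in which no adjacent equal pair is found has no adjacent duplicates
theorem findPair_none_irred : ∀ {l : List Char}, findPair l = none → Irred l := by
  intro l
  induction l with
  | nil => intro _; trivial
  | cons a t ih =>
    intro h
    cases t with
    | nil => trivial
    | cons b t' =>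
      by_cases hab : a = b
      · simp [findPair, hab] at h
      · simp [findPair, hab] at h
        exact ⟨hab, ih h⟩

-- running the stack over a duplicate-free word onto a compatible stack only pushes
theorem foldl_pushes : ∀ (l : List Char), Irred l →
    ∀ st : List Char, (∀ a, l.head? = some a → st.head? ≠ some a) →
    l.foldl stackStep st = l.reverse ++ st := by
  intro l
  induction l with
  | nil => intro _ st _; simp
  | cons a t ih =>
    intro hc st hcomp
    have hstep : stackStep st a = a :: st := by
      cases st with
      | nil => simp [stackStep]
      | cons x r =>
        have hx : ¬ x = a := by
          have := hcomp a rfl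
          simpa using this
        simp [stackStep, hx]
    have ht : t.foldl stackStep (a :: st) = t.reverse ++ (a :: st) := by
      refine ih (irred_tail hc) (a :: st) ?_
      intro c hc'
      cases t with
      | nil => simp at hc'
      | cons d t'' =>
        simp at hc'
        subst hc'
        have had : a ≠ d := hc.1
        simpa using had
    simp [List.foldl, hstep, ht]

theorem reduceFix_none (l : List Char) : findPair (reduceFix l) = none := by
  rw [reduceFix]
  split
  · rename_i l' h
    exact reduceFix_none l'
  · assumption
termination_by l.length
decreasing_by exact findPair_length (by assumption)

-- the per-string tests agree
theorem inner_eq (s : String) :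
    ((s.toList.foldl stackStep []).length = 0) ↔ ((reduceFix s.toList).isEmpty = true) := by
  have h1 : s.toList.foldl stackStep [] = (reduceFix s.toList).foldl stackStep [] :=
    foldl_reduceFix s.toList [] trivial
  have hc : Irred (reduceFix s.toList) := findPair_none_irred (reduceFix_none s.toList)
  have h2 : (reduceFix s.toList).foldl stackStep [] = (reduceFix s.toList).reverse ++ [] :=
    foldl_pushes _ hc [] (by intro a _; simp)
  rw [h1, h2]
  cases hr : reduceFix s.toList with
  | nil => simp
  | cons x r => simp

theorem outer_eq (strings : List String) : ∀ g : Int,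
    strings.foldl (fun goodword string =>
      let stack := string.toList.foldl stackStep []
      if stack.length = 0 then goodword + 1 else goodword) g =
    strings.foldl (fun goodword string =>
      if (reduceFix string.toList).isEmpty then goodword + 1 else goodword) g := by
  induction strings with
  | nil => intro g; rfl
  | cons s t ih =>
    intro g
    simp only [List.foldl]
    by_cases h : (reduceFix s.toList).isEmpty = true
    · rw [if_pos ((inner_eq s).mpr h), if_pos h]
      exact ih _
    · rw [if_neg (fun hh => h ((inner_eq s).mp hh)), if_neg h]
      exact ih _

-- ===== VERDICT (by name: the statement is the Claim_ definition above) =====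
theorem solution_spec : Claim_equal_solution := by
  intro N strings _
  unfold Spec_solution solution solution_alt
  exact outer_eq strings 0
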